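-- pv_equiv track=rewrite | github.com/cssmason/algorithm-practice | leetcode/python/0667-Beautiful-Arrangement-II/solution.py | constructArray
-- ===== SOURCE A (Python) =====
-- from typing import List
--
-- def constructArray(n: int, k: int) -> List[int]:
--     res = []
--     left, right = 1, n
--     for i in range(k):
--         if i % 2 == 0:
--             res.append(left)
--             left += 1
--         else:
--             res.append(right)
--             right -= 1
--
--     if k % 2 == 0:
--         while left <= right:
--             res.append(right)
--             right -= 1
--     else:
--         while left <= right:
--             res.append(left)
--             left += 1
--
--     return res
-- ===== SOURCE B (Python) =====
-- def constructArray(n: int, k: int) -> list: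
--     m = max(k, 0)
--     lo_end = m - m // 2          # number of "low" values taken (ceil(m/2))
--     hi_end = n - m // 2          # last untouched high value
--     lows = list(range(1, lo_end + 1))
--     highs = list(range(n, hi_end, -1))
--     prefix = [0] * m
--     prefix[0::2] = lows
--     prefix[1::2] = highs
--     if k % 2 == 0:
--         tail = list(range(hi_end, lo_end, -1))
--     else:
--         tail = list(range(lo_end + 1, hi_end + 1))
--     return prefix + tail
-- ===== Notes on version B (the rewrite author's own statement) =====
-- stated objective: alternative
-- what changed: Replaces A's index loop with two mutable pointers and two trailing while-loops by precomputing the low/high ranges, riffling them via even/odd slice assignment into the zig-zag prefix, and emitting the tail as one contiguous range.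
import Mathlib
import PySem

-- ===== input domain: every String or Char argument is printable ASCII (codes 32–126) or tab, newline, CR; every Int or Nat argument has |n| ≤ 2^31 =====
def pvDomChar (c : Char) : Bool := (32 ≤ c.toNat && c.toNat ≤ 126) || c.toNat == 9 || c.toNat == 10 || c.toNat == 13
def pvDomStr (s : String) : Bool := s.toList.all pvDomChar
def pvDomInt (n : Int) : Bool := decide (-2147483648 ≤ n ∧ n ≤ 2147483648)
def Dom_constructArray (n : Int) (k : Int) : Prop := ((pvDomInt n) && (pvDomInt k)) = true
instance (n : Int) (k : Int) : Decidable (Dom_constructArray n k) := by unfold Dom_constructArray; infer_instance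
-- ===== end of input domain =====

-- B replaces A's pointer loop and trailing while-loops by precomputed ranges,
-- riffled into the zig-zag prefix, plus one contiguous tail range (objective: alternative).

-- ===== PORT A =====
-- while left <= right: res.append(right); right -= 1
def pvWhileDownA (left right : Int) (res : List Int) : List Int :=
  if left ≤ right then pvWhileDownA left (right - 1) (res ++ [right]) else res
termination_by (right + 1 - left).toNat
decreasing_by omega

-- while left <= right: res.append(left); left += 1
def pvWhileUpA (left right : Int) (res : List Int) : List Int :=
  if left ≤ right then pvWhileUpA (left + 1) right (res ++ [left]) else res
termination_by (right + 1 - left).toNat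
decreasing_by omega

def constructArray (n : Int) (k : Int) : List Int :=
  let st := (PySem.List.pyRange 0 k 1).foldl
    (fun (st : List Int × Int × Int) i =>
      if PySem.Int.mod i 2 == 0 then (st.1 ++ [st.2.1], st.2.1 + 1, st.2.2)
      else (st.1 ++ [st.2.2], st.2.1, st.2.2 - 1)) ([], 1, n)
  if PySem.Int.mod k 2 == 0 then pvWhileDownA st.2.1 st.2.2 st.1
  else pvWhileUpA st.2.1 st.2.2 st.1

-- ===== PORT B =====
-- Exact value of "pre = [0]*m; pre[0::2] = lows; pre[1::2] = highs": in Source B the lengths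
-- of lows/highs equal the lengths of those slices, so the result is the riffle of the two
-- lists, lows first.
def pvInterleave : List Int → List Int → List Int
  | [], _ => []
  | a :: as, bs => a :: pvInterleave bs as
termination_by xs ys => xs.length + ys.length
decreasing_by simp; omega

def constructArray_alt (n : Int) (k : Int) : List Int :=
  let m : Int := max k 0
  let loEnd := m - PySem.Int.floordiv m 2
  let hiEnd := n - PySem.Int.floordiv m 2
  let lows := PySem.List.pyRange 1 (loEnd + 1) 1
  let highs := PySem.List.pyRange n hiEnd (-1)
  let pre := pvInterleave lows highs
  let tail := if PySem.Int.mod k 2 == 0 then PySem.List.pyRange hiEnd loEnd (-1)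
              else PySem.List.pyRange (loEnd + 1) (hiEnd + 1) 1
  pre ++ tail

-- ===== PRECONDITION & SPEC =====
def Spec_constructArray (n : Int) (k : Int) (out : List Int) : Prop := out = constructArray_alt n k
instance (n : Int) (k : Int) (out : List Int) : Decidable (Spec_constructArray n k out) := by unfold Spec_constructArray; infer_instance

-- ===== CLAIM (what is proved, stated in full; the proofs are below) =====
def Claim_equal_constructArray : Prop := ∀ (n : Int) (k : Int), Dom_constructArray n k → Spec_constructArray n k (constructArray n k)

-- ===== LEMMAS AND PROOFS =====

-- the zig-zag prefix, in two phases (zigE: a low value next; zigO: a high value next)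
mutual
def zigE : Nat → Int → Int → List Int
  | 0, _, _ => []
  | m + 1, l, r => l :: zigO m (l + 1) r
def zigO : Nat → Int → Int → List Int
  | 0, _, _ => []
  | m + 1, l, r => r :: zigE m l (r - 1)
end

theorem foldA_eq (m : Nat) : ∀ (a l r : Int) (res : List Int), 0 ≤ a →
    (PySem.List.pyRange a (a + m) 1).foldl
      (fun (st : List Int × Int × Int) i =>
        if PySem.Int.mod i 2 == 0 then (st.1 ++ [st.2.1], st.2.1 + 1, st.2.2)
        else (st.1 ++ [st.2.2], st.2.1, st.2.2 - 1)) (res, l, r)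
    = (if a % 2 = 0 then (res ++ zigE m l r, l + ((m + 1) / 2 : Nat), r - ((m / 2 : Nat) : Int))
       else (res ++ zigO m l r, l + ((m / 2 : Nat) : Int), r - ((m + 1) / 2 : Nat))) := by
  induction m with
  | zero =>
    intro a l r res ha
    rw [PySem.List.pyRange_one_eq_nil (by omega)]
    split <;> simp [zigE, zigO]
  | succ m ih =>
    intro a l r res ha
    rw [PySem.List.pyRange_one_cons (by push_cast; omega : a < a + ((m + 1 : Nat) : Int))]
    rw [List.foldl_cons]
    have hmod : PySem.Int.mod a 2 = a % 2 := PySem.Int.mod_eq_emod_of_pos (by omega)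
    have hsh : a + 1 + (m : Int) = a + ((m + 1 : Nat) : Int) := by push_cast; ring
    by_cases hpar : a % 2 = 0
    · have hc : (PySem.Int.mod a 2 == 0) = true := by rw [hmod]; exact beq_iff_eq.mpr hpar
      rw [if_pos hc, if_pos hpar]
      have hrec := ih (a + 1) (l + 1) r (res ++ [l]) (by omega)
      rw [hsh, if_neg (by omega : ¬ (a + 1) % 2 = 0)] at hrec
      have e1 : res ++ [l] ++ zigO m (l + 1) r = res ++ zigE (m + 1) l r := by simp [zigE]
      have e2 : l + 1 + ((m / 2 : Nat) : Int) = l + (((m + 1 + 1) / 2 : Nat) : Int) := by omega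
      rw [hrec, e1, e2]
    · have hc : ¬ ((PySem.Int.mod a 2 == 0) = true) := by
        rw [hmod]; simp; omega
      rw [if_neg hc, if_neg hpar]
      have hrec := ih (a + 1) l (r - 1) (res ++ [r]) (by omega)
      rw [hsh, if_pos (by omega : (a + 1) % 2 = 0)] at hrec
      have e1 : res ++ [r] ++ zigE m l (r - 1) = res ++ zigO (m + 1) l r := by simp [zigO]
      have e2 : r - 1 - ((m / 2 : Nat) : Int) = r - (((m + 1 + 1) / 2 : Nat) : Int) := by omega
      rw [hrec, e1, e2]

theorem interleave_zig (m : Nat) :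
    (∀ l r : Int, pvInterleave (PySem.List.pyRange l (l + ((m + 1) / 2 : Nat)) 1)
        (PySem.List.pyRange r (r - ((m / 2 : Nat) : Int)) (-1)) = zigE m l r) ∧
    (∀ l r : Int, pvInterleave (PySem.List.pyRange r (r - ((m + 1) / 2 : Nat)) (-1))
        (PySem.List.pyRange l (l + ((m / 2 : Nat) : Int)) 1) = zigO m l r) := by
  induction m with
  | zero =>
    constructor <;> intro l r
    · rw [PySem.List.pyRange_one_eq_nil (by omega)]
      simp [pvInterleave, zigE]
    · rw [PySem.List.pyRange_neg_one_eq_nil (by omega)]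
      simp [pvInterleave, zigO]
  | succ m ih =>
    obtain ⟨ihE, ihO⟩ := ih
    constructor
    · intro l r
      rw [PySem.List.pyRange_one_cons (by omega : l < l + (((m + 1 + 1) / 2 : Nat) : Int))]
      rw [show l + (((m + 1 + 1) / 2 : Nat) : Int) = (l + 1) + ((m / 2 : Nat) : Int) from by omega]
      simp only [pvInterleave]
      rw [ihO (l + 1) r]
      simp [zigE]
    · intro l r
      rw [PySem.List.pyRange_neg_one_cons (by omega : r - (((m + 1 + 1) / 2 : Nat) : Int) < r)]
      rw [show r - (((m + 1 + 1) / 2 : Nat) : Int) = (r - 1) - ((m / 2 : Nat) : Int) from by omega]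
      simp only [pvInterleave]
      rw [ihE l (r - 1)]
      simp [zigO]

theorem whileDown_eq (left right : Int) (res : List Int) :
    pvWhileDownA left right res = res ++ PySem.List.pyRange right (left - 1) (-1) := by
  fun_induction pvWhileDownA left right res with
  | case1 r res h ih =>
    rw [ih, PySem.List.pyRange_neg_one_cons (by omega : left - 1 < r)]
    simp
  | case2 r res h =>
    rw [PySem.List.pyRange_neg_one_eq_nil (by omega)]
    simp

theorem whileUp_eq (left right : Int) (res : List Int) :
    pvWhileUpA left right res = res ++ PySem.List.pyRange left (right + 1) 1 := by
  fun_induction pvWhileUpA left right res with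
  | case1 l res h ih =>
    rw [ih, PySem.List.pyRange_one_cons (by omega : l < right + 1)]
    simp
  | case2 l res h =>
    rw [PySem.List.pyRange_one_eq_nil (by omega)]
    simp

-- ===== VERDICT (by name: the statement is the Claim_ definition above) =====
theorem constructArray_spec : Claim_equal_constructArray := by
  intro n k _
  unfold Spec_constructArray
  set m : Nat := k.toNat with hm
  have hmax : max k 0 = (m : Int) := by omega
  have hfd : PySem.Int.floordiv (m : Int) 2 = ((m / 2 : Nat) : Int) := by
    rw [PySem.Int.floordiv_eq_ediv_of_pos (by omega)]; omega
  have hlo : (m : Int) - ((m / 2 : Nat) : Int) = (((m + 1) / 2 : Nat) : Int) := by omega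
  have hE := (interleave_zig m).1 1 n
  rw [show (1 : Int) + (((m + 1) / 2 : Nat) : Int) = (((m + 1) / 2 : Nat) : Int) + 1 from by ring] at hE
  have hB : constructArray_alt n k =
      zigE m 1 n ++ (if PySem.Int.mod k 2 == 0 then
          PySem.List.pyRange (n - ((m / 2 : Nat) : Int)) (((m + 1) / 2 : Nat) : Int) (-1)
        else
          PySem.List.pyRange ((((m + 1) / 2 : Nat) : Int) + 1) (n - ((m / 2 : Nat) : Int) + 1) 1) := by
    unfold constructArray_alt
    simp only [hmax, hfd, hlo, hE]
  rw [hB]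
  unfold constructArray
  have hrange : PySem.List.pyRange 0 k 1 = PySem.List.pyRange 0 ((0 : Int) + (m : Nat)) 1 := by
    by_cases hk : 0 ≤ k
    · congr 1; omega
    · rw [PySem.List.pyRange_one_eq_nil (by omega), PySem.List.pyRange_one_eq_nil (by omega)]
  have hfold := foldA_eq m 0 1 n [] le_rfl
  rw [if_pos (by omega : (0 : Int) % 2 = 0)] at hfold
  simp only [List.nil_append] at hfold
  simp only [hrange, hfold]
  by_cases hp : (PySem.Int.mod k 2 == 0) = true
  · rw [if_pos hp, if_pos hp, whileDown_eq]
    rw [show (1 : Int) + (((m + 1) / 2 : Nat) : Int) - 1 = (((m + 1) / 2 : Nat) : Int) from by ring]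
  · rw [if_neg hp, if_neg hp, whileUp_eq]
    rw [show (1 : Int) + (((m + 1) / 2 : Nat) : Int) = (((m + 1) / 2 : Nat) : Int) + 1 from by ring]
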